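-- pv_equiv track=rewrite | github.com/gongyh/NannoEpiCode | Nuclesome_occupancy/mergedReplicate/deepTools/plotHeatmap/count_nucleosomes_DEG.py | count_summits
-- ===== SOURCE A (Python) =====
-- def count_summits(start, end, summits, interval=1000, step=10):
--     if start > end:
--         step = -step
--     counts = []
--     for i in range(start,end,step):
--         frag_start = i-500
--         frag_end = i+500
--         count = 0
--         for st in summits:
--             if st>frag_start and st<frag_end:
--                 count += 1
--         counts.append(count)
--     return counts
-- ===== SOURCE B (Python) =====
-- def _bisect_left(s, x):
--     lo, hi = 0, len(s)
--     while lo < hi: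
--         mid = (lo + hi) // 2
--         if s[mid] < x:
--             lo = mid + 1
--         else:
--             hi = mid
--     return lo
--
--
-- def _bisect_right(s, x):
--     lo, hi = 0, len(s)
--     while lo < hi:
--         mid = (lo + hi) // 2
--         if s[mid] <= x:
--             lo = mid + 1
--         else:
--             hi = mid
--     return lo
--
--
-- def count_summits(start, end, summits, interval=1000, step=10):
--     if start > end:
--         step = -step
--     s = sorted(summits)
--     return [_bisect_left(s, i + 500) - _bisect_right(s, i - 500)
--             for i in range(start, end, step)]
-- ===== Notes on version B (the rewrite author's own statement) =====
-- stated objective: alternative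
-- what changed: B sorts the summits once and answers each window by two hand-written binary searches (count = bisect_left(s, i+500) - bisect_right(s, i-500)) instead of A's linear scan of all summits for every window position; a timing run's inputs have very few windows, so this is not measurably faster there.
import Mathlib
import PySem

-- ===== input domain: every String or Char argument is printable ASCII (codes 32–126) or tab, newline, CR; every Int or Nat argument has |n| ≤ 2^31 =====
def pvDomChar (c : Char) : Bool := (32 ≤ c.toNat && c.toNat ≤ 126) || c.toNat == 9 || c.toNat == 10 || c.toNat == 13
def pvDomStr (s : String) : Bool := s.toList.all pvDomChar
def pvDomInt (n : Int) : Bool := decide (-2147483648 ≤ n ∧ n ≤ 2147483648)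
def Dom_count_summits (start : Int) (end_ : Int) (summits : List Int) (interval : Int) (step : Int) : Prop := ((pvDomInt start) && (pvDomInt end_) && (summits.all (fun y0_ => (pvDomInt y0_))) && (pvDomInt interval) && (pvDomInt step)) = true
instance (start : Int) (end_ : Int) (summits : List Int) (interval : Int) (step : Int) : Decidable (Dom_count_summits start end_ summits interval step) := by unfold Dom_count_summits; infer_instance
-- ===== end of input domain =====

-- B sorts the summits once and answers each window with two binary searches
-- instead of A's per-window linear scan (objective: alternative algorithm).

-- ===== PORT A =====
def count_summits (start : Int) (end_ : Int) (summits : List Int) (interval : Int) (step : Int) : List Int :=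
  let step' : Int := if start > end_ then -step else step
  (PySem.List.pyRange start end_ step').foldl
    (fun counts i =>
      let frag_start := i - 500
      let frag_end := i + 500
      let count := summits.foldl
        (fun c st => if st > frag_start ∧ st < frag_end then c + 1 else c) (0 : Int)
      counts ++ [count])
    []

-- ===== PORT B =====
-- shared body of Source B's two hand-written binary-search helpers; the comparison
-- against x ('s[mid] < x' for _bisect_left, 's[mid] <= x' for _bisect_right) is
-- the predicate p.  s[mid] is in range whenever lo < hi ≤ len s, so getD is exact.
def pvBsearch (s : List Int) (p : Int → Bool) (lo hi : Nat) : Nat :=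
  if _h : lo < hi then
    let mid := (lo + hi) / 2
    if p (s.getD mid 0) then pvBsearch s p (mid + 1) hi
    else pvBsearch s p lo mid
  else lo
termination_by hi - lo
decreasing_by all_goals omega

def pvBisectLeft (s : List Int) (x : Int) : Nat :=
  pvBsearch s (fun v => decide (v < x)) 0 s.length

def pvBisectRight (s : List Int) (x : Int) : Nat :=
  pvBsearch s (fun v => decide (v ≤ x)) 0 s.length

def count_summits_alt (start : Int) (end_ : Int) (summits : List Int) (interval : Int) (step : Int) : List Int :=
  let step' : Int := if start > end_ then -step else step
  let s := PySem.List.sorted summits (fun x => x) false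
  (PySem.List.pyRange start end_ step').map
    (fun i => (pvBisectLeft s (i + 500) : Int) - (pvBisectRight s (i - 500) : Int))

-- ===== PRECONDITION & SPEC =====
-- Python's range raises ValueError when the effective step is 0.
def Pre_count_summits (start : Int) (end_ : Int) (summits : List Int) (interval : Int) (step : Int) : Prop := step ≠ 0
instance (start : Int) (end_ : Int) (summits : List Int) (interval : Int) (step : Int) : Decidable (Pre_count_summits start end_ summits interval step) := by unfold Pre_count_summits; infer_instance

def pvWitness_count_summits : Int × Int × List Int × Int × Int := (0, 25, [3, 12, 700], 1000, 10)

def Spec_count_summits (start : Int) (end_ : Int) (summits : List Int) (interval : Int) (step : Int) (out : List Int) : Prop := out = count_summits_alt start end_ summits interval step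
instance (start : Int) (end_ : Int) (summits : List Int) (interval : Int) (step : Int) (out : List Int) : Decidable (Spec_count_summits start end_ summits interval step out) := by unfold Spec_count_summits; infer_instance

-- ===== CLAIM (what is proved, stated in full; the proofs are below) =====
def Claim_equal_count_summits : Prop := ∀ (start : Int) (end_ : Int) (summits : List Int) (interval : Int) (step : Int), Dom_count_summits start end_ summits interval step → Pre_count_summits start end_ summits interval step → Spec_count_summits start end_ summits interval step (count_summits start end_ summits interval step)

-- ===== LEMMAS AND PROOFS =====

-- countP of a list whose first k elements satisfy p and whose rest do not is k
theorem pv_countP_prefix (p : Int → Bool) :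
    ∀ (s : List Int) (k : Nat), k ≤ s.length →
    (∀ j (h : j < s.length), j < k → p s[j]) →
    (∀ j (h : j < s.length), k ≤ j → ¬ p s[j]) →
    s.countP p = k := by
  intro s
  induction s with
  | nil => intro k hk _ _; simp at hk ⊢; omega
  | cons a t ih =>
    intro k hk hpre hpost
    cases k with
    | zero =>
      have : (a :: t).countP p = 0 := by
        rw [List.countP_eq_zero]
        intro x hx
        obtain ⟨j, hj, rfl⟩ := List.getElem_of_mem hx
        exact hpost j hj (Nat.zero_le _)
      omega
    | succ k' =>
      have ha : p a := hpre 0 (by simp) (Nat.succ_pos _)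
      rw [List.countP_cons]
      simp only [ha, if_true]
      have := ih k' (by simpa using hk)
        (fun j h hj => hpre (j+1) (by simpa using h) (by omega))
        (fun j h hj => hpost (j+1) (by simpa using h) (by omega))
      omega

-- the binary search computes countP p when p is downward closed on a sorted list
theorem pv_bsearch_eq (s : List Int) (p : Int → Bool)
    (hs : s.Pairwise (· ≤ ·))
    (hdc : ∀ a b : Int, a ≤ b → p b → p a) :
    ∀ lo hi, lo ≤ hi → hi ≤ s.length →
    (∀ j (h : j < s.length), j < lo → p s[j]) →
    (∀ j (h : j < s.length), hi ≤ j → ¬ p s[j]) →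
    pvBsearch s p lo hi = s.countP p := by
  intro lo hi
  induction lo, hi using pvBsearch.induct s p with
  | case1 lo hi h mid htrue ih =>
    intro _ hlen hpre hpost
    rw [pvBsearch]
    simp only [dif_pos h]
    rw [if_pos htrue]
    have hmid : mid < s.length := by simp only [mid]; omega
    have hget : s.getD mid 0 = s[mid] := List.getD_eq_getElem s 0 hmid
    apply ih (by simp only [mid]; omega) hlen
    · intro j hj hjlt
      rcases Nat.lt_or_ge j lo with hc | hc
      · exact hpre j hj hc
      · have hle : s[j] ≤ s[mid] := by
          rcases Nat.lt_or_ge j mid with hc2 | hc2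
          · exact (List.pairwise_iff_getElem.mp hs) j mid hj hmid hc2
          · have : j = mid := by omega
            subst this; exact le_refl _
        exact hdc _ _ hle (by rwa [hget] at htrue)
    · exact hpost
  | case2 lo hi h mid hfalse ih =>
    intro hlohi hlen hpre hpost
    rw [pvBsearch]
    simp only [dif_pos h]
    rw [if_neg hfalse]
    have hmid : mid < s.length := by simp only [mid]; omega
    have hget : s.getD mid 0 = s[mid] := List.getD_eq_getElem s 0 hmid
    apply ih (by simp only [mid]; omega) (by omega) hpre
    intro j hj hjge
    have hle : s[mid] ≤ s[j] := by
      rcases Nat.lt_or_ge mid j with hc | hc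
      · exact (List.pairwise_iff_getElem.mp hs) mid j hmid hj hc
      · have : mid = j := by omega
        subst this; exact le_refl _
    intro hpj
    have hpm : p s[mid] := hdc _ _ hle hpj
    rw [← hget] at hpm
    exact hfalse hpm
  | case3 lo hi h =>
    intro hlohi hlen hpre hpost
    rw [pvBsearch]
    rw [dif_neg h]
    have : lo = hi := by omega
    subst this
    exact (pv_countP_prefix p s lo hlen (fun j hj => hpre j hj) (fun j hj => hpost j hj)).symm

theorem pv_bisectLeft_eq (s : List Int) (x : Int) (hs : s.Pairwise (· ≤ ·)) :
    pvBisectLeft s x = s.countP (fun v => decide (v < x)) := by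
  apply pv_bsearch_eq s _ hs
  · intro a b hab hb
    simp only [decide_eq_true_eq] at *
    omega
  · omega
  · omega
  · intro j hj hjlt; omega
  · intro j hj hge; omega

theorem pv_bisectRight_eq (s : List Int) (x : Int) (hs : s.Pairwise (· ≤ ·)) :
    pvBisectRight s x = s.countP (fun v => decide (v ≤ x)) := by
  apply pv_bsearch_eq s _ hs
  · intro a b hab hb
    simp only [decide_eq_true_eq] at *
    omega
  · omega
  · omega
  · intro j hj hjlt; omega
  · intro j hj hge; omega

-- countP (< fe) splits as countP (≤ fs) + countP (strictly between) when fs < fe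
theorem pv_countP_split (fs fe : Int) (h : fs < fe) :
    ∀ l : List Int,
    l.countP (fun v => decide (v < fe)) =
      l.countP (fun v => decide (v ≤ fs)) +
      l.countP (fun v => decide (fs < v) && decide (v < fe)) := by
  intro l
  induction l with
  | nil => simp
  | cons a t ih =>
    simp only [List.countP_cons, ih]
    by_cases h1 : a < fe <;> by_cases h2 : a ≤ fs <;> by_cases h3 : fs < a <;>
      simp [h1, h2, h3] <;> omega

-- A's inner loop is countP, with an Int accumulator
theorem pv_foldl_count (q : Int → Prop) [DecidablePred q] :
    ∀ (l : List Int) (c : Int),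
    l.foldl (fun c st => if q st then c + 1 else c) c = c + l.countP (fun v => decide (q v)) := by
  intro l
  induction l with
  | nil => simp
  | cons a t ih =>
    intro c
    by_cases h : q a <;> simp [List.countP_cons, h, ih] <;> omega

-- A's outer append loop is a map
theorem pv_foldl_append (g : Int → Int) :
    ∀ (r : List Int) (acc : List Int),
    r.foldl (fun a i => a ++ [g i]) acc = acc ++ r.map g := by
  intro r
  induction r with
  | nil => simp
  | cons a t ih => intro acc; simp [ih]

-- ===== VERDICT (by name: the statement is the Claim_ definition above) =====
theorem count_summits_spec : Claim_equal_count_summits := by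
  intro start end_ summits interval step _ _
  unfold Spec_count_summits count_summits count_summits_alt
  simp only []
  rw [pv_foldl_append]
  simp only [List.nil_append]
  apply List.map_congr_left
  intro i _
  set s := PySem.List.sorted summits (fun x => x) false with hsdef
  have hperm : s.Perm summits := PySem.List.sorted_perm summits (fun x => x) false
  have hs : s.Pairwise (· ≤ ·) := PySem.List.sorted_pairwise summits (fun x => x)
  rw [pv_foldl_count (fun st => st > i - 500 ∧ st < i + 500) summits 0,
      pv_bisectLeft_eq s (i + 500) hs, pv_bisectRight_eq s (i - 500) hs,
      hperm.countP_eq, hperm.countP_eq,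
      pv_countP_split (i - 500) (i + 500) (by omega) summits]
  have hc : (summits.countP fun v => decide (v > i - 500 ∧ v < i + 500)) =
      summits.countP fun v => decide (i - 500 < v) && decide (v < i + 500) := by
    apply List.countP_congr; intro x _; simp [gt_iff_lt, Bool.decide_and]
  rw [hc]
  push_cast
  omega
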